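-- pv_equiv track=rewrite | github.com/LA3D/Cogitarelink | cogitarelink/cli/rdf_cache.py | determine_item_type
-- ===== SOURCE A (Python) =====
-- from typing import Optional, List, Dict, Any
--
-- def determine_item_type(types: List[str]) -> str:
--     """Determine the type of an RDF item from its rdf:type values."""
--
--     if 'owl:Class' in types or 'rdfs:Class' in types:
--         return 'class'
--     elif any(prop_type in types for prop_type in ['rdf:Property', 'owl:ObjectProperty', 'owl:DatatypeProperty']):
--         return 'property'
--     elif 'owl:Ontology' in types:
--         return 'ontology'
--     else:
--         return 'resource'
-- ===== SOURCE B (Python) =====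
-- from typing import Optional, List, Dict, Any
--
-- # Numeric priority of each recognised rdf:type; smaller = higher priority.
-- _PRIORITY = {'owl:Class': 0, 'rdfs:Class': 0,
--              'rdf:Property': 1, 'owl:ObjectProperty': 1, 'owl:DatatypeProperty': 1,
--              'owl:Ontology': 2}
-- _LABELS = ['class', 'property', 'ontology', 'resource']
--
-- def determine_item_type(types: List[str]) -> str:
--     """Determine the type of an RDF item from its rdf:type values."""
--     best = 3
--     for t in types:
--         best = min(best, _PRIORITY.get(t, 3))
--     return _LABELS[best]
-- ===== Notes on version B (the rewrite author's own statement) =====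
-- stated objective: alternative
-- what changed: Instead of A's branch cascade that scans the input list repeatedly for each trigger literal, B makes a single pass over the input, mapping each element to a numeric priority rank via a dict and keeping the running minimum, then indexes the label list by the best rank.
import Mathlib
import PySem

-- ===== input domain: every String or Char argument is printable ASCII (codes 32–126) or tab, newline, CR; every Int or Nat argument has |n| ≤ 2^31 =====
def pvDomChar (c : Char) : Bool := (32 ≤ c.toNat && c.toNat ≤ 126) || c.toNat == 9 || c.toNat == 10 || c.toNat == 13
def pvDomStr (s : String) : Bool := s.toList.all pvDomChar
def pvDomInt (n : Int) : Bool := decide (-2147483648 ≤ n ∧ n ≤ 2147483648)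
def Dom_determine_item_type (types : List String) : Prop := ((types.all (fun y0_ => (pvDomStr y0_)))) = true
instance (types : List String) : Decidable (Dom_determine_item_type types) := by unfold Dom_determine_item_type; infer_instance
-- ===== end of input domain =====

-- B replaces A's branch cascade of membership scans by a single pass over the input keeping
-- the minimum priority rank (dict lookup per element), then indexing a label list (alternative, same cost).

-- ===== PORT A =====
def determine_item_type (types : List String) : String :=
  if types.contains "owl:Class" || types.contains "rdfs:Class" then "class"
  else if ["rdf:Property", "owl:ObjectProperty", "owl:DatatypeProperty"].any
      (fun prop_type => types.contains prop_type) then "property"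
  else if types.contains "owl:Ontology" then "ontology"
  else "resource"

-- ===== PORT B =====
def ditPriority : PySem.Dict String Int :=
  PySem.Dict.ofList [("owl:Class", 0), ("rdfs:Class", 0),
    ("rdf:Property", 1), ("owl:ObjectProperty", 1), ("owl:DatatypeProperty", 1),
    ("owl:Ontology", 2)]

def ditLabels : List String := ["class", "property", "ontology", "resource"]

def determine_item_type_alt (types : List String) : String :=
  -- the 'for t in types: best = min(best, _PRIORITY.get(t, 3))' loop
  let best := types.foldl (fun b t => min b (ditPriority.getD t 3)) 3
  -- _LABELS[best]; best is always in [0, 3], so the index never fails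
  (PySem.List.pyGet? ditLabels best).getD ""

-- ===== PRECONDITION & SPEC =====
def Spec_determine_item_type (types : List String) (out : String) : Prop := out = determine_item_type_alt types
instance (types : List String) (out : String) : Decidable (Spec_determine_item_type types out) := by unfold Spec_determine_item_type; infer_instance

-- ===== CLAIM (what is proved, stated in full; the proofs are below) =====
def Claim_equal_determine_item_type : Prop := ∀ (types : List String), Dom_determine_item_type types → Spec_determine_item_type types (determine_item_type types)

-- ===== LEMMAS AND PROOFS =====

-- the rank of one element, evaluated
set_option maxRecDepth 8192 in
theorem dit_rank_eval (t : String) : ditPriority.getD t 3 =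
    if t = "owl:Class" ∨ t = "rdfs:Class" then 0
    else if t = "rdf:Property" ∨ t = "owl:ObjectProperty" ∨ t = "owl:DatatypeProperty" then 1
    else if t = "owl:Ontology" then 2
    else 3 := by
  by_cases h1 : t = "owl:Class"
  · subst h1; decide
  by_cases h2 : t = "rdfs:Class"
  · subst h2; decide
  by_cases h3 : t = "rdf:Property"
  · subst h3; decide
  by_cases h4 : t = "owl:ObjectProperty"
  · subst h4; decide
  by_cases h5 : t = "owl:DatatypeProperty"
  · subst h5; decide
  by_cases h6 : t = "owl:Ontology"
  · subst h6; decide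
  rw [show ditPriority = PySem.Dict.mk [("owl:Class", 0), ("rdfs:Class", 0),
    ("rdf:Property", 1), ("owl:ObjectProperty", 1), ("owl:DatatypeProperty", 1),
    ("owl:Ontology", 2)] from by decide]
  simp only [PySem.Dict.getD, PySem.Dict.get?_mk_cons, beq_iff_eq]
  rw [if_neg (fun h => h1 h.symm), if_neg (fun h => h2 h.symm), if_neg (fun h => h3 h.symm),
      if_neg (fun h => h4 h.symm), if_neg (fun h => h5 h.symm), if_neg (fun h => h6 h.symm),
      if_neg (by rintro (h | h); exacts [h1 h, h2 h]),
      if_neg (by rintro (h | h | h); exacts [h3 h, h4 h, h5 h]),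
      if_neg h6]
  rfl

-- pulling the initial accumulator out of the min-fold
theorem foldl_min_init (r : String → Int) (l : List String) :
    ∀ b c : Int, l.foldl (fun b t => min b (r t)) (min b c) = min b (l.foldl (fun b t => min b (r t)) c) := by
  induction l with
  | nil => intro b c; rfl
  | cons t rest ih =>
    intro b c
    simp only [List.foldl_cons, min_assoc]
    exact ih b (min c (r t))

-- A's branch rank, as a function of the membership tests
def ditARank (types : List String) : Int :=
  if types.contains "owl:Class" || types.contains "rdfs:Class" then 0
  else if types.contains "rdf:Property" || types.contains "owl:ObjectProperty"
      || types.contains "owl:DatatypeProperty" then 1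
  else if types.contains "owl:Ontology" then 2
  else 3

-- one cons step of A's branch rank
theorem aRank_cons (t : String) (rest : List String) :
    ditARank (t :: rest) =
      min (if t = "owl:Class" ∨ t = "rdfs:Class" then 0
        else if t = "rdf:Property" ∨ t = "owl:ObjectProperty" ∨ t = "owl:DatatypeProperty" then 1
        else if t = "owl:Ontology" then 2 else 3) (ditARank rest) := by
  simp only [ditARank, List.contains_cons, Bool.or_eq_true, beq_iff_eq,
    show ∀ s : String, ("owl:Class" = s) = (s = "owl:Class") from fun _ => propext eq_comm,
    show ∀ s : String, ("rdfs:Class" = s) = (s = "rdfs:Class") from fun _ => propext eq_comm,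
    show ∀ s : String, ("rdf:Property" = s) = (s = "rdf:Property") from fun _ => propext eq_comm,
    show ∀ s : String, ("owl:ObjectProperty" = s) = (s = "owl:ObjectProperty") from fun _ => propext eq_comm,
    show ∀ s : String, ("owl:DatatypeProperty" = s) = (s = "owl:DatatypeProperty") from fun _ => propext eq_comm,
    show ∀ s : String, ("owl:Ontology" = s) = (s = "owl:Ontology") from fun _ => propext eq_comm]
  split_ifs <;> first | omega | tauto

-- the min-fold computes exactly A's branch rank
theorem fold_eq_aRank (types : List String) :
    types.foldl (fun b t => min b (ditPriority.getD t 3)) 3 = ditARank types := by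
  induction types with
  | nil => rfl
  | cons t rest ih =>
    have step : (t :: rest).foldl (fun b t => min b (ditPriority.getD t 3)) 3
        = min (ditPriority.getD t 3) (rest.foldl (fun b t => min b (ditPriority.getD t 3)) 3) := by
      simp only [List.foldl_cons]
      rw [min_comm 3 (ditPriority.getD t 3)]
      exact foldl_min_init _ rest (ditPriority.getD t 3) 3
    rw [step, ih, dit_rank_eval, aRank_cons]

-- ===== VERDICT (by name: the statement is the Claim_ definition above) =====
theorem determine_item_type_spec : Claim_equal_determine_item_type := by
  intro types _
  unfold Spec_determine_item_type determine_item_type determine_item_type_alt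
  rw [fold_eq_aRank, ditARank]
  simp only [List.any_cons, List.any_nil, Bool.or_false, Bool.or_assoc]
  split_ifs <;> rfl
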